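-- pv_equiv track=rewrite | github.com/JoshMayerr/jweb | hw2.py | build_graph_from_stream
-- ===== SOURCE A (Python) =====
-- def build_graph_from_stream(stream, page_ids: set):
--     adjacency_list = {}
--     for page_id, outgoing in stream:
--         adjacency_list[page_id] = list(outgoing)
--     all_ids = set(page_ids)
--     for pid in list(adjacency_list.keys()):
--         if pid not in all_ids:
--             del adjacency_list[pid]
--         else:
--             adjacency_list[pid] = [t for t in adjacency_list[pid] if t in all_ids]
--     return all_ids, adjacency_list
-- ===== SOURCE B (Python) =====
-- def build_graph_from_stream(stream, page_ids: set):
--     all_ids = set(page_ids)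
--     adjacency_list = {}
--     for page_id, outgoing in stream:
--         if page_id in all_ids:
--             adjacency_list[page_id] = [t for t in outgoing if t in all_ids]
--     return all_ids, adjacency_list
-- ===== Notes on version B (the rewrite author's own statement) =====
-- stated objective: simpler
-- what changed: B computes all_ids first and builds the adjacency dict in a single filtered pass over the stream (skip non-member pages, filter targets on insertion), eliminating A's second insert-then-prune loop over the dict's keys.
import Mathlib
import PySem

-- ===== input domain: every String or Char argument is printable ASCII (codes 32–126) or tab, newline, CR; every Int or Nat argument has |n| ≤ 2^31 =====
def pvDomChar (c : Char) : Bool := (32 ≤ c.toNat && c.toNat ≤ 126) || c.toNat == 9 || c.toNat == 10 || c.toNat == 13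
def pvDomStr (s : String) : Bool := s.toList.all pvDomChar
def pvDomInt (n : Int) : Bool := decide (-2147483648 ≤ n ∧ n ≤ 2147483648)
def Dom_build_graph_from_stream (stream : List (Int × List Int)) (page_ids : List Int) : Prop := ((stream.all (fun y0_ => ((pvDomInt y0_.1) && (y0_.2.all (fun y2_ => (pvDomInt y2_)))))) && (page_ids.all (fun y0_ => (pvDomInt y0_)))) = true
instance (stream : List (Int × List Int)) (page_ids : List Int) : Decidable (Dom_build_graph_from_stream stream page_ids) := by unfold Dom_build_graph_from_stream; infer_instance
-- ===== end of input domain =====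

-- B builds the adjacency dict in ONE filtered pass over the stream (skip pages not in
-- all_ids, filter targets on insertion), instead of A's build-everything-then-prune
-- second loop over the dict's keys. Same cost class; simpler decomposition.

-- ===== PORT A =====
def build_graph_from_stream (stream : List (Int × List Int)) (page_ids : List Int) : List Int × (List (Int × List Int)) :=
  let adjacency_list : PySem.Dict Int (List Int) :=
    stream.foldl (fun d p => d.insert p.1 p.2) PySem.Dict.empty
  let all_ids : PySem.Set Int := PySem.Set.ofList page_ids
  let pruned : PySem.Dict Int (List Int) :=
    adjacency_list.keys.foldl (fun d pid =>
      if !(PySem.Set.contains all_ids pid) then d.erase pid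
      else d.modify pid [] (fun v => v.filter (fun t => PySem.Set.contains all_ids t))) adjacency_list
  (all_ids, pruned.items)

-- ===== PORT B =====
def build_graph_from_stream_alt (stream : List (Int × List Int)) (page_ids : List Int) : List Int × (List (Int × List Int)) :=
  let all_ids : PySem.Set Int := PySem.Set.ofList page_ids
  let adjacency_list : PySem.Dict Int (List Int) :=
    stream.foldl (fun d p =>
      if PySem.Set.contains all_ids p.1 then
        d.insert p.1 (p.2.filter (fun t => PySem.Set.contains all_ids t))
      else d) PySem.Dict.empty
  (all_ids, adjacency_list.items)

-- ===== PRECONDITION & SPEC =====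
def Spec_build_graph_from_stream (stream : List (Int × List Int)) (page_ids : List Int) (out : List Int × (List (Int × List Int))) : Prop := out = build_graph_from_stream_alt stream page_ids
instance (stream : List (Int × List Int)) (page_ids : List Int) (out : List Int × (List (Int × List Int))) : Decidable (Spec_build_graph_from_stream stream page_ids out) := by unfold Spec_build_graph_from_stream; infer_instance

-- ===== CLAIM (what is proved, stated in full; the proofs are below) =====
def Claim_equal_build_graph_from_stream : Prop := ∀ (stream : List (Int × List Int)) (page_ids : List Int), Dom_build_graph_from_stream stream page_ids → Spec_build_graph_from_stream stream page_ids (build_graph_from_stream stream page_ids)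

-- ===== LEMMAS AND PROOFS =====

-- The "prune by S" transform of an items list: keep entries whose key is in S,
-- filter each value list by membership in S.
def pvF (S : List Int) (l : List (Int × List Int)) : List (Int × List Int) :=
  (l.filter (fun p => PySem.Set.contains S p.1)).map
    (fun p => (p.1, p.2.filter (fun t => PySem.Set.contains S t)))

theorem pvF_cons (S : List Int) (k : Int) (v : List Int) (l : List (Int × List Int)) :
    pvF S ((k, v) :: l) =
      (if PySem.Set.contains S k then
        (k, v.filter (fun t => PySem.Set.contains S t)) :: pvF S l
      else pvF S l) := by
  simp only [pvF, List.filter_cons]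
  split <;> simp_all

-- pruning commutes with a Python dict-insert
theorem pvF_insert (S : List Int) (l : List (Int × List Int)) (k : Int) (v : List Int) :
    pvF S ((PySem.Dict.insert ⟨l⟩ k v).items) =
      (if PySem.Set.contains S k then
        (PySem.Dict.insert ⟨pvF S l⟩ k (v.filter (fun t => PySem.Set.contains S t))).items
      else pvF S l) := by
  simp only [PySem.Dict.insert, PySem.Dict.contains]
  by_cases hl : l.any (fun p => p.1 == k)
  · simp only [hl, if_true]
    have h1 : (l.map (fun p => if p.1 == k then (k, v) else p)).filter
        (fun p => PySem.Set.contains S p.1)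
        = (l.filter (fun p => PySem.Set.contains S p.1)).map (fun p => if p.1 == k then (k, v) else p) := by
      rw [List.filter_map]
      congr 1
      apply List.filter_congr
      intro p _
      by_cases h : p.1 = k
      · simp [h]
      · simp [h]
    by_cases hS : PySem.Set.contains S k
    · have hl2 : (pvF S l).any (fun p => p.1 == k) := by
        rw [List.any_eq_true] at hl ⊢
        obtain ⟨p, hp, hpk⟩ := hl
        refine ⟨(k, p.2.filter (fun t => PySem.Set.contains S t)), ?_, by simp⟩
        simp only [pvF, List.mem_map]
        refine ⟨p, ?_, by simp [eq_of_beq hpk]⟩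
        rw [List.mem_filter]
        exact ⟨hp, by rw [eq_of_beq hpk]; exact hS⟩
      simp only [hS, if_true, hl2]
      simp only [pvF, h1, List.map_map]
      apply List.map_congr_left
      intro p _
      by_cases h : p.1 = k
      · simp [h]
      · simp [h]
    · simp only [hS, if_false]
      simp only [pvF, h1, List.map_map]
      conv_rhs => rw [← List.map_id ((l.filter (fun p => PySem.Set.contains S p.1)).map
        (fun p => (p.1, p.2.filter (fun t => PySem.Set.contains S t))))]
      rw [List.map_map]
      apply List.map_congr_left
      intro p hp
      rw [List.mem_filter] at hp
      have h : ¬ (p.1 = k) := by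
        intro h; rw [h] at hp; exact hS hp.2
      simp [h]
  · simp only [hl, Bool.false_eq_true, if_false]
    have hsplit : pvF S (l ++ [(k, v)]) = pvF S l ++ pvF S [(k, v)] := by
      simp [pvF, List.filter_append]
    by_cases hS : PySem.Set.contains S k
    · have hl2 : ¬ (pvF S l).any (fun p => p.1 == k) := by
        rw [List.any_eq_true] at hl ⊢
        push_neg
        intro q hq
        simp only [pvF, List.mem_map] at hq
        obtain ⟨p, hp, rfl⟩ := hq
        rw [List.mem_filter] at hp
        intro hk
        exact hl ⟨p, hp.1, hk⟩
      simp only [hS, if_true, hl2, if_false]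
      have hS' : k ∈ S := by simpa [PySem.Set.contains] using hS
      simp [pvF, hS']
    · have hS' : k ∉ S := by simpa [PySem.Set.contains] using hS
      simp [pvF, hS']

-- B's single filtered pass over the stream computes the pruning of A's first pass
theorem pv_fold_B (S : List Int) (stream : List (Int × List Int)) :
    ∀ l : List (Int × List Int),
      stream.foldl (fun d p =>
          if PySem.Set.contains S p.1 then
            d.insert p.1 (p.2.filter (fun t => PySem.Set.contains S t))
          else d) (⟨pvF S l⟩ : PySem.Dict Int (List Int)) =
      ⟨pvF S ((stream.foldl (fun d p => d.insert p.1 p.2)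
          (⟨l⟩ : PySem.Dict Int (List Int))).items)⟩ := by
  induction stream with
  | nil => intro l; rfl
  | cons p rest ih =>
    intro l
    simp only [List.foldl_cons]
    have step : (if PySem.Set.contains S p.1 then
          (⟨pvF S l⟩ : PySem.Dict Int (List Int)).insert p.1 (p.2.filter (fun t => PySem.Set.contains S t))
        else ⟨pvF S l⟩) = ⟨pvF S ((PySem.Dict.insert ⟨l⟩ p.1 p.2).items)⟩ := by
      rw [pvF_insert]
      split <;> rfl
    rw [step]
    exact ih _

-- A's snapshot loop over the keys of a nodup-keyed dict performs exactly the pruning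
theorem pv_loop_C (S : List Int) :
    ∀ (todo done : List (Int × List Int)),
      ((done ++ todo).map Prod.fst).Nodup →
      (todo.map Prod.fst).foldl (fun d pid =>
          if !(PySem.Set.contains S pid) then d.erase pid
          else d.modify pid [] (fun v => v.filter (fun t => PySem.Set.contains S t)))
        (⟨done ++ todo⟩ : PySem.Dict Int (List Int)) =
      ⟨done ++ pvF S todo⟩ := by
  intro todo
  induction todo with
  | nil => intro done h; simp [pvF]
  | cons p rest ih =>
    obtain ⟨k, v⟩ := p
    intro done h
    have hd : ∀ q ∈ done, q.1 ≠ k := by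
      intro q hq hqk
      rw [List.map_append, List.map_cons] at h
      have hdis := (List.nodup_append.mp h).2.2
      exact hdis k (List.mem_map.mpr ⟨q, hq, hqk⟩) k List.mem_cons_self rfl
    have hr : ∀ q ∈ rest, q.1 ≠ k := by
      intro q hq hqk
      rw [List.map_append, List.map_cons] at h
      have h2 := (List.nodup_append.mp h).2.1
      rw [List.nodup_cons] at h2
      exact h2.1 (List.mem_map.mpr ⟨q, hq, hqk⟩)
    simp only [List.map_cons, List.foldl_cons]
    by_cases hS : PySem.Set.contains S k
    · -- member branch: modify in place
      have hSm : k ∈ S := by simpa [PySem.Set.contains] using hS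
      have hget : (⟨done ++ (k, v) :: rest⟩ : PySem.Dict Int (List Int)).getD k [] = v := by
        simp only [PySem.Dict.getD, PySem.Dict.get?, PySem.Dict.items]
        rw [List.find?_append]
        have h1 : List.find? (fun p => p.1 == k) done = none := by
          rw [List.find?_eq_none]
          intro q hq; simp [hd q hq]
        rw [h1]
        simp
      have hcont : (⟨done ++ (k, v) :: rest⟩ : PySem.Dict Int (List Int)).contains k = true := by
        simp [PySem.Dict.contains, PySem.Dict.items]
      have hstep : (if !(PySem.Set.contains S k) then
            (⟨done ++ (k, v) :: rest⟩ : PySem.Dict Int (List Int)).erase k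
          else (⟨done ++ (k, v) :: rest⟩ : PySem.Dict Int (List Int)).modify k []
            (fun v => v.filter (fun t => PySem.Set.contains S t))) =
          ⟨(done ++ [(k, v.filter (fun t => PySem.Set.contains S t))]) ++ rest⟩ := by
        rw [if_neg (by simp [hSm])]
        simp only [PySem.Dict.modify, hget, PySem.Dict.insert, hcont, if_true, PySem.Dict.items]
        congr 1
        rw [List.map_append, List.map_cons]
        have h1 : List.map (fun p => if p.1 == k then (k, v.filter (fun t => PySem.Set.contains S t)) else p) done = done := by
          apply (List.map_congr_left ?_).trans (List.map_id done)
          intro q hq; simp [hd q hq]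
        have h2 : List.map (fun p => if p.1 == k then (k, v.filter (fun t => PySem.Set.contains S t)) else p) rest = rest := by
          apply (List.map_congr_left ?_).trans (List.map_id rest)
          intro q hq; simp [hr q hq]
        rw [h1, h2]; simp
      rw [hstep]
      have hnd : (((done ++ [(k, v.filter (fun t => PySem.Set.contains S t))]) ++ rest).map Prod.fst).Nodup := by
        have he : ((done ++ [(k, v.filter (fun t => PySem.Set.contains S t))]) ++ rest).map Prod.fst
            = (done ++ (k, v) :: rest).map Prod.fst := by simp
        rw [he]; exact h
      rw [ih (done ++ [(k, v.filter (fun t => PySem.Set.contains S t))]) hnd]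
      rw [pvF_cons, if_pos hS]
      simp
    · -- non-member branch: del
      have hSm : k ∉ S := by simpa [PySem.Set.contains] using hS
      have hstep : (if !(PySem.Set.contains S k) then
            (⟨done ++ (k, v) :: rest⟩ : PySem.Dict Int (List Int)).erase k
          else (⟨done ++ (k, v) :: rest⟩ : PySem.Dict Int (List Int)).modify k []
            (fun v => v.filter (fun t => PySem.Set.contains S t))) =
          ⟨done ++ rest⟩ := by
        rw [if_pos (by simp [hSm])]
        simp only [PySem.Dict.erase, PySem.Dict.items]
        congr 1
        rw [List.filter_append, List.filter_cons]
        have h1 : List.filter (fun p => !(p.1 == k)) done = done := by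
          rw [List.filter_eq_self]; intro q hq; simp [hd q hq]
        have h2 : List.filter (fun p => !(p.1 == k)) rest = rest := by
          rw [List.filter_eq_self]; intro q hq; simp [hr q hq]
        rw [h1, h2]; simp
      rw [hstep]
      have hnd : ((done ++ rest).map Prod.fst).Nodup := by
        refine List.Nodup.sublist ?_ h
        exact List.Sublist.map _ (List.Sublist.append (List.Sublist.refl done) (List.sublist_cons_self _ _))
      rw [ih done hnd, pvF_cons, if_neg hS]

-- ===== VERDICT (by name: the statement is the Claim_ definition above) =====
theorem build_graph_from_stream_spec : Claim_equal_build_graph_from_stream := by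
  intro stream page_ids _
  unfold Spec_build_graph_from_stream build_graph_from_stream build_graph_from_stream_alt
  have hnd : ((([] : List (Int × List Int)) ++
      (stream.foldl (fun d (p : Int × List Int) => d.insert p.1 p.2)
        (PySem.Dict.empty : PySem.Dict Int (List Int))).items).map Prod.fst).Nodup := by
    simp only [List.nil_append]
    have hk := PySem.Dict.nodup_keys_foldl_insert_key stream (fun p : Int × List Int => p.1)
      (fun _ p => p.2) (PySem.Dict.empty : PySem.Dict Int (List Int))
      (by simp [PySem.Dict.keys, PySem.Dict.empty])
    simpa [PySem.Dict.keys] using hk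
  have hA := pv_loop_C (PySem.Set.ofList page_ids)
    ((stream.foldl (fun d (p : Int × List Int) => d.insert p.1 p.2)
      (PySem.Dict.empty : PySem.Dict Int (List Int))).items) [] hnd
  have hB := pv_fold_B (PySem.Set.ofList page_ids) stream []
  exact congrArg (Prod.mk (PySem.Set.ofList page_ids))
    (congrArg PySem.Dict.items (hA.trans hB.symm))
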